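-- pv_equiv track=rewrite | github.com/singhuist/cyberbullying-detection | encode.py | simpleEncode
-- ===== SOURCE A (Python) =====
-- def simpleEncode(sentenceList):
--     '''
--     Encodes sentences into numbers, simply adding a new entry for a new word
--     :param sentenceList: List of sentences to be vectorised
--     :return: encoded list of sentences
--     '''
--
--     dictionary = {}
--     counter = 0
--     encodedData = []
--     for s in sentenceList:
--         encodedsent = []
--         s = s.split()
--         for w in range(len(s)):
--             word = s[w]
--             if word not in dictionary:
--                 dictionary[word] = counter + 1
--                 counter = counter + 1
--             s[w] = dictionary[word]
--             encodedsent.append(s[w])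
--         encodedData.append(encodedsent)
--
--     return encodedData
-- ===== SOURCE B (Python) =====
-- def simpleEncode(sentenceList):
--     '''
--     Rank-based re-implementation: no counter, no word-to-ID mapping, no
--     first-encounter branching.  The ID of a word is a closed property of the
--     flat token stream: 1 + its position in the ordered deduplication of that
--     stream (first-appearance order), read off by list search.
--     '''
--     tokenized = [s.split() for s in sentenceList]
--     words = [w for toks in tokenized for w in toks]
--     uniq = list(dict.fromkeys(words))
--     return [[uniq.index(w) + 1 for w in toks] for toks in tokenized]
-- ===== Notes on version B (the rewrite author's own statement) =====
-- stated objective: alternative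
-- what changed: A assigns IDs with a mutable dictionary and counter, branching on first encounter of each token inside one nested loop; B keeps no ID state at all: it deduplicates the flat token stream once (first-appearance order) and reads each token's ID off as 1 + its position in that deduplicated list.
import Mathlib
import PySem

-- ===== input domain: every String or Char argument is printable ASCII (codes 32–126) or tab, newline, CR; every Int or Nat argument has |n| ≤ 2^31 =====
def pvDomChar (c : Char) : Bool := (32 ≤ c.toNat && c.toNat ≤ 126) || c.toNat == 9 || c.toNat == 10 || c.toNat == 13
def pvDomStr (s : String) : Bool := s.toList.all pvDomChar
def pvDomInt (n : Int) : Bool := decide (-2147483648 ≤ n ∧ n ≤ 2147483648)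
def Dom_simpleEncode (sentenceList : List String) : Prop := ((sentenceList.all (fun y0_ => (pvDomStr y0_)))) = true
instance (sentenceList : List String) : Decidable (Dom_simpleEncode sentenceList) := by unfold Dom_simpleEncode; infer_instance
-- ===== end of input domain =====

-- B replaces A's stateful dict-and-counter encoding by a rank computation: dedup the flat
-- token stream once and read each token's ID off as 1 + its position there; same values.

-- ===== PORT A =====
-- A's inner loop 'for w in range(len(s))' reads s[w] (index always in range) and then
-- overwrites s[w] with a value that is never read again (only appended immediately),
-- so it is ported as a fold over the word list carrying (dictionary, counter, encodedsent).
-- 'dictionary[word]' always succeeds (word was just inserted if absent): ported as getD _ 0.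
def simpleEncodeInner (st : PySem.Dict String Int × Int × List Int) (word : String) :
    PySem.Dict String Int × Int × List Int :=
  let d := st.1
  let c := st.2.1
  let enc := st.2.2
  let d' := if d.contains word then d else d.insert word (c + 1)
  let c' := if d.contains word then c else c + 1
  (d', c', enc ++ [d'.getD word 0])

def simpleEncode (sentenceList : List String) : List (List Int) :=
  (sentenceList.foldl
    (fun (st : PySem.Dict String Int × Int × List (List Int)) s =>
      let toks := PySem.Str.split₀ s
      let r := toks.foldl simpleEncodeInner (st.1, st.2.1, [])
      (r.1, r.2.1, st.2.2 ++ [r.2.2]))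
    (PySem.Dict.empty, 0, [])).2.2

-- ===== PORT B =====
-- uniq.index(w) + 1; uniq.index always succeeds in Source B (w is drawn from words, uniq
-- holds the distinct words): ported as index? ….getD 0.
def simpleEncodeId (uniq : List String) (w : String) : Int :=
  (((PySem.List.index? uniq w).getD 0 : Nat) : Int) + 1

def simpleEncode_alt (sentenceList : List String) : List (List Int) :=
  let tokenized := sentenceList.map PySem.Str.split₀
  let words := tokenized.flatMap (fun toks => toks)
  let uniq := PySem.List.dedup words
  tokenized.map (fun toks => toks.map (fun w => simpleEncodeId uniq w))

-- ===== PRECONDITION & SPEC =====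
def Spec_simpleEncode (sentenceList : List String) (out : List (List Int)) : Prop := out = simpleEncode_alt sentenceList
instance (sentenceList : List String) (out : List (List Int)) : Decidable (Spec_simpleEncode sentenceList out) := by unfold Spec_simpleEncode; infer_instance

-- ===== CLAIM (what is proved, stated in full; the proofs are below) =====
def Claim_equal_simpleEncode : Prop := ∀ (sentenceList : List String), Dom_simpleEncode sentenceList → Spec_simpleEncode sentenceList (simpleEncode sentenceList)

-- ===== LEMMAS AND PROOFS =====

-- A's "insert on first sight with ID = counter + 1" as a pure dict step (counter = d.size)
def simpleEncodeVocabStep (d : PySem.Dict String Int) (w : String) : PySem.Dict String Int :=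
  if d.contains w then d else d.insert w ((d.size : Int) + 1)

theorem vocabStep_mono (d : PySem.Dict String Int) (w' w : String) (v : Int)
    (h : d.get? w = some v) : (simpleEncodeVocabStep d w').get? w = some v := by
  unfold simpleEncodeVocabStep
  split_ifs with hc
  · exact h
  · rw [PySem.Dict.get?_insert]
    split_ifs with he
    · subst he
      rw [PySem.Dict.contains_eq_isSome_get?, h] at hc
      simp at hc
    · exact h

theorem vocabRun_mono (ts : List String) (d : PySem.Dict String Int) (w : String) (v : Int)
    (h : d.get? w = some v) : (ts.foldl simpleEncodeVocabStep d).get? w = some v := by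
  induction ts generalizing d with
  | nil => exact h
  | cons t ts ih => exact ih _ (vocabStep_mono d t w v h)

theorem vocabStep_contains_self (d : PySem.Dict String Int) (w : String) :
    (simpleEncodeVocabStep d w).contains w = true := by
  unfold simpleEncodeVocabStep
  split_ifs with hc
  · exact hc
  · exact PySem.Dict.contains_insert_self d w _

theorem vocabStep_size (d : PySem.Dict String Int) (w : String) :
    ((simpleEncodeVocabStep d w).size : Int) =
      if d.contains w then (d.size : Int) else (d.size : Int) + 1 := by
  unfold simpleEncodeVocabStep
  split_ifs with hc
  · rfl
  · rw [PySem.Dict.size_insert]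
    simp [hc]

-- A's inner loop = the vocabulary fold + lookups in any dict V extending its final state
theorem inner_eq (toks : List String) (d : PySem.Dict String Int) (c : Int) (enc : List Int)
    (V : PySem.Dict String Int) (hc : c = (d.size : Int))
    (hV : ∀ w v, (toks.foldl simpleEncodeVocabStep d).get? w = some v → V.get? w = some v) :
    toks.foldl simpleEncodeInner (d, c, enc) =
      (toks.foldl simpleEncodeVocabStep d, ((toks.foldl simpleEncodeVocabStep d).size : Int),
        enc ++ toks.map (fun w => V.getD w 0)) := by
  induction toks generalizing d c enc with
  | nil => simp [hc]
  | cons w ts ih =>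
    have hstep : simpleEncodeInner (d, c, enc) w =
        (simpleEncodeVocabStep d w, ((simpleEncodeVocabStep d w).size : Int),
          enc ++ [(simpleEncodeVocabStep d w).getD w 0]) := by
      show ((if d.contains w then d else d.insert w (c + 1)),
            (if d.contains w then c else c + 1),
            enc ++ [(if d.contains w then d else d.insert w (c + 1)).getD w 0]) = _
      rw [vocabStep_size, hc]
      show ((if d.contains w then d else d.insert w ((d.size : Int) + 1)), _, _) = _
      rw [show (if d.contains w then d else d.insert w ((d.size : Int) + 1)) =
          simpleEncodeVocabStep d w from rfl]
    have hself : (simpleEncodeVocabStep d w).get? w =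
        some ((simpleEncodeVocabStep d w).getD w 0) := by
      have hcs := vocabStep_contains_self d w
      rw [PySem.Dict.contains_eq_isSome_get?] at hcs
      cases hg : (simpleEncodeVocabStep d w).get? w with
      | none => rw [hg] at hcs; simp at hcs
      | some v => rw [PySem.Dict.getD_eq_get?_getD, hg]; rfl
    have hVw : V.getD w 0 = (simpleEncodeVocabStep d w).getD w 0 := by
      have h1 := vocabRun_mono ts (simpleEncodeVocabStep d w) w _ hself
      have h2 := hV w _ (by simpa using h1)
      rw [PySem.Dict.getD_eq_get?_getD, h2]
      rfl
    simp only [List.foldl_cons, hstep]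
    rw [ih (simpleEncodeVocabStep d w) _ _ rfl (by simpa using hV)]
    simp [hVw]

-- folding the vocabulary sentence by sentence = folding it over the flat token stream
theorem nestedFold_eq_flat (ls : List (List String)) (d : PySem.Dict String Int) :
    ls.foldl (fun d toks => toks.foldl simpleEncodeVocabStep d) d
      = (ls.flatMap (fun t => t)).foldl simpleEncodeVocabStep d := by
  induction ls generalizing d with
  | nil => rfl
  | cons t ls ih => simp [List.foldl_append, ih]

-- A's outer loop over token lists = the vocabulary fold + per-sentence lookups in V
theorem outer_eq (ls : List (List String)) (d : PySem.Dict String Int) (c : Int)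
    (acc : List (List Int)) (V : PySem.Dict String Int) (hc : c = (d.size : Int))
    (hV : ∀ w v, (ls.foldl (fun d toks => toks.foldl simpleEncodeVocabStep d) d).get? w = some v →
      V.get? w = some v) :
    ls.foldl
      (fun (st : PySem.Dict String Int × Int × List (List Int)) toks =>
        ((toks.foldl simpleEncodeInner (st.1, st.2.1, [])).1,
         (toks.foldl simpleEncodeInner (st.1, st.2.1, [])).2.1,
         st.2.2 ++ [(toks.foldl simpleEncodeInner (st.1, st.2.1, [])).2.2]))
      (d, c, acc) =
      (ls.foldl (fun d toks => toks.foldl simpleEncodeVocabStep d) d,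
        ((ls.foldl (fun d toks => toks.foldl simpleEncodeVocabStep d) d).size : Int),
        acc ++ ls.map (fun toks => toks.map (fun w => V.getD w 0))) := by
  induction ls generalizing d c acc with
  | nil => simp [hc]
  | cons toks ls ih =>
    have hmono : ∀ w v, (toks.foldl simpleEncodeVocabStep d).get? w = some v →
        V.get? w = some v := fun w v h => by
      apply hV w v
      simp only [List.foldl_cons]
      rw [nestedFold_eq_flat]
      exact vocabRun_mono _ _ w v h
    simp only [List.foldl_cons]
    rw [inner_eq toks d c [] V hc hmono]
    rw [ih _ _ _ rfl (by simpa using hV)]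
    simp

-- bridges A's fold over sentences (splitting inside the loop) to a fold over the token lists
theorem foldl_tok (l : List String) (st : PySem.Dict String Int × Int × List (List Int)) :
    l.foldl
      (fun (st : PySem.Dict String Int × Int × List (List Int)) s =>
        (((PySem.Str.split₀ s).foldl simpleEncodeInner (st.1, st.2.1, [])).1,
         ((PySem.Str.split₀ s).foldl simpleEncodeInner (st.1, st.2.1, [])).2.1,
         st.2.2 ++ [((PySem.Str.split₀ s).foldl simpleEncodeInner (st.1, st.2.1, [])).2.2])) st =
    (l.map PySem.Str.split₀).foldl
      (fun (st : PySem.Dict String Int × Int × List (List Int)) toks =>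
        ((toks.foldl simpleEncodeInner (st.1, st.2.1, [])).1,
         (toks.foldl simpleEncodeInner (st.1, st.2.1, [])).2.1,
         st.2.2 ++ [(toks.foldl simpleEncodeInner (st.1, st.2.1, [])).2.2])) st := by
  induction l generalizing st with
  | nil => rfl
  | cons x l ih =>
    simp only [List.foldl_cons, List.map_cons]
    exact ih _

-- the vocabulary fold, started from empty, IS B's closed formula (plus its size)
theorem vocab_spec (ws : List String) :
    (∀ w, (ws.foldl simpleEncodeVocabStep PySem.Dict.empty).get? w =
      (PySem.List.index? ws w).map (fun i => ((PySem.Set.ofList (ws.take i)).length : Int) + 1)) ∧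
    ((ws.foldl simpleEncodeVocabStep PySem.Dict.empty).size : Int) = ((PySem.Set.ofList ws).length : Int) := by
  induction ws using List.reverseRecOn with
  | nil => constructor
           · intro w; simp [PySem.List.index?]
           · simp
  | append_singleton ws x ih =>
    obtain ⟨hg, hs⟩ := ih
    rw [List.foldl_append]
    simp only [List.foldl_cons, List.foldl_nil]
    set d := ws.foldl simpleEncodeVocabStep PySem.Dict.empty with hd
    have hcontains : d.contains x = decide (x ∈ ws) := by
      rw [PySem.Dict.contains_eq_isSome_get?, hg x]
      rcases h : PySem.List.index? ws x with _ | i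
      · rw [PySem.List.index?_eq_none_iff] at h; simp [h]
      · have hx : x ∈ ws := (PySem.List.index?_isSome_iff ws x).mp (by rw [h]; rfl)
        simp [hx]
    by_cases hx : x ∈ ws
    · have hstep : simpleEncodeVocabStep d x = d := by simp [simpleEncodeVocabStep, hcontains, hx]
      rw [hstep]
      constructor
      · intro w
        rw [hg w]
        by_cases hw : w ∈ ws
        · rw [PySem.List.index?_append_of_mem _ hw]
          rcases h : PySem.List.index? ws w with _ | i
          · rw [PySem.List.index?_eq_none_iff] at h; exact absurd hw h
          · obtain ⟨hik, -, -⟩ := PySem.List.getElem_of_index?_eq_some h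
            simp [List.take_append_of_le_length (Nat.le_of_lt hik)]
        · have h1 : PySem.List.index? ws w = none := by rw [PySem.List.index?_eq_none_iff]; exact hw
          have h2 : PySem.List.index? (ws ++ [x]) w = none := by
            rw [PySem.List.index?_eq_none_iff]; simp [hw]; rintro rfl; exact hw hx
          simp only [PySem.List.index?_eq_idxOf?] at h1 h2 ⊢
          rw [h1, h2]; rfl
      · rw [hs]
        congr 1
        rw [PySem.Set.ofList_append_singleton]
        simp [PySem.Set.add, PySem.Set.contains, hx, PySem.Set.mem_ofList]
    · have hstep : simpleEncodeVocabStep d x = d.insert x ((d.size : Int) + 1) := by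
        simp [simpleEncodeVocabStep, hcontains, hx]
      rw [hstep]
      have hset : PySem.Set.ofList (ws ++ [x]) = PySem.Set.ofList ws ++ [x] := by
        rw [PySem.Set.ofList_append_singleton]; simp [PySem.Set.add, PySem.Set.contains, hx]
      constructor
      · intro w
        rw [PySem.Dict.get?_insert]
        by_cases he : w = x
        · subst he
          rw [PySem.List.index?_append_singleton_self ws w hx]
          simp [List.take_append_of_le_length (le_refl ws.length), hs]
        · simp only [if_neg he]
          rw [hg w]
          by_cases hw : w ∈ ws
          · rw [PySem.List.index?_append_of_mem _ hw]
            rcases h : PySem.List.index? ws w with _ | i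
            · rw [PySem.List.index?_eq_none_iff] at h; exact absurd hw h
            · obtain ⟨hik, -, -⟩ := PySem.List.getElem_of_index?_eq_some h
              simp [List.take_append_of_le_length (Nat.le_of_lt hik)]
          · have h1 : PySem.List.index? ws w = none := by rw [PySem.List.index?_eq_none_iff]; exact hw
            have h2 : PySem.List.index? (ws ++ [x]) w = none := by
              rw [PySem.List.index?_eq_none_iff]; simp [hw, he]
            rw [h1, h2]; rfl
      · rw [PySem.Dict.size_insert]
        simp [hcontains, hx, hset, hs]

-- the first-appearance rank in the deduplicated stream counts the distinct words
-- before the first occurrence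
theorem index_dedup (ws : List String) (w : String) (i : Nat)
    (h : PySem.List.index? ws w = some i) :
    PySem.List.index? (PySem.List.dedup ws) w = some ((PySem.Set.ofList (ws.take i)).length) := by
  obtain ⟨pre, suf, rfl, rfl, hpre⟩ := (PySem.List.index?_eq_some_iff _ _ _).mp h
  have htake : (pre ++ w :: suf).take pre.length = pre := by
    rw [List.take_append_of_le_length (le_refl pre.length), List.take_length]
  rw [htake]
  have hsplit : pre ++ w :: suf = (pre ++ [w]) ++ suf := by simp
  rw [hsplit, PySem.List.dedup_eq_ofList, PySem.Set.ofList_append,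
      PySem.Set.update_eq_append_filter]
  have hone : PySem.Set.ofList (pre ++ [w]) = PySem.Set.ofList pre ++ [w] := by
    rw [PySem.Set.ofList_append_singleton]
    simp [PySem.Set.add, PySem.Set.contains, PySem.Set.mem_ofList, hpre]
  rw [hone, PySem.List.index?_append_of_mem _ (show w ∈ PySem.Set.ofList pre ++ [w] by simp)]
  have hwpre : w ∉ PySem.Set.ofList pre := by rw [PySem.Set.mem_ofList]; exact hpre
  exact PySem.List.index?_append_singleton_self _ w hwpre

-- the final vocabulary's lookup agrees with B's rank on every word of the stream
theorem vocab_getD_eq_id (ws : List String) (w : String) (hw : w ∈ ws) :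
    (ws.foldl simpleEncodeVocabStep PySem.Dict.empty).getD w 0
      = simpleEncodeId (PySem.List.dedup ws) w := by
  obtain ⟨hg, -⟩ := vocab_spec ws
  rcases h : PySem.List.index? ws w with _ | i
  · rw [PySem.List.index?_eq_none_iff] at h; exact absurd hw h
  · rw [PySem.Dict.getD_eq_get?_getD, hg w, h]
    have h' := index_dedup ws w i h
    simp only [PySem.List.index?_eq_idxOf?, PySem.List.dedup_eq_ofList] at h'
    simp [simpleEncodeId, h']

-- ===== VERDICT (by name: the statement is the Claim_ definition above) =====
theorem simpleEncode_spec : Claim_equal_simpleEncode := by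
  intro sentenceList _
  show (sentenceList.foldl
      (fun (st : PySem.Dict String Int × Int × List (List Int)) s =>
        (((PySem.Str.split₀ s).foldl simpleEncodeInner (st.1, st.2.1, [])).1,
         ((PySem.Str.split₀ s).foldl simpleEncodeInner (st.1, st.2.1, [])).2.1,
         st.2.2 ++ [((PySem.Str.split₀ s).foldl simpleEncodeInner (st.1, st.2.1, [])).2.2]))
      (PySem.Dict.empty, 0, [])).2.2 =
    (sentenceList.map PySem.Str.split₀).map (fun toks => toks.map (fun w =>
      simpleEncodeId
        (PySem.List.dedup ((sentenceList.map PySem.Str.split₀).flatMap (fun toks => toks))) w))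
  rw [foldl_tok]
  rw [outer_eq (sentenceList.map PySem.Str.split₀) PySem.Dict.empty 0 []
      ((sentenceList.map PySem.Str.split₀).foldl
        (fun d toks => toks.foldl simpleEncodeVocabStep d) PySem.Dict.empty)
      (by simp) (fun w v h => h)]
  simp only [List.nil_append]
  apply List.map_congr_left
  intro toks htoks
  apply List.map_congr_left
  intro w hw
  rw [nestedFold_eq_flat]
  exact vocab_getD_eq_id _ w (List.mem_flatMap.mpr ⟨toks, htoks, hw⟩)
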